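-- pv_equiv track=rewrite | github.com/bubuoreo/Daily_coding_problems | PalindromeFinder.py | palindromeFinder
-- ===== SOURCE A (Python) =====
-- def palindromeFinder(string):
--     ret= []
--     tmp_string = string
--     while len(string):
--         i, j = (0, len(tmp_string)-1)
--         while i <= j:
--             if tmp_string[i] == tmp_string[j] and (i == j or abs(i-j) == 1):
--                 ret.append(tmp_string)
--                 string = string[len(tmp_string):]
--                 tmp_string = string
--                 break
--             elif tmp_string[i] == tmp_string[j]:
--                 i += 1
--                 j -= 1
--             else:
--                 tmp_string = tmp_string[:-1]
--                 break
--
--     return ret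
-- ===== SOURCE B (Python) =====
-- def palindromeFinder(string):
--     n = len(string)
--     # dynamic programme: pal holds every pair (i, j) with string[i:j+1] a palindrome,
--     # built once for the whole string by increasing substring length
--     pal = set()
--     for i in range(n):
--         pal.add((i, i))
--     for length in range(2, n + 1):
--         for i in range(n - length + 1):
--             j = i + length - 1
--             if string[i] == string[j] and (length == 2 or (i + 1, j - 1) in pal):
--                 pal.add((i, j))
--     # greedy partition by table lookup, no slicing/re-checking
--     ret = []
--     i = 0
--     while i < n:
--         j = n - 1
--         while (i, j) not in pal:
--             j -= 1
--         ret.append(string[i:j + 1])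
--         i = j + 1
--     return ret
-- ===== Notes on version B (the rewrite author's own statement) =====
-- stated objective: faster
-- what changed: A's restarting two-pointer scan that trims the candidate prefix one character at a time is replaced by a classic dynamic-programming palindrome table: one global pass builds the set of all palindromic (i,j) index pairs by increasing substring length, after which the greedy partition is pure index arithmetic with table lookups and no per-candidate palindrome re-checking.
import Mathlib
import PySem

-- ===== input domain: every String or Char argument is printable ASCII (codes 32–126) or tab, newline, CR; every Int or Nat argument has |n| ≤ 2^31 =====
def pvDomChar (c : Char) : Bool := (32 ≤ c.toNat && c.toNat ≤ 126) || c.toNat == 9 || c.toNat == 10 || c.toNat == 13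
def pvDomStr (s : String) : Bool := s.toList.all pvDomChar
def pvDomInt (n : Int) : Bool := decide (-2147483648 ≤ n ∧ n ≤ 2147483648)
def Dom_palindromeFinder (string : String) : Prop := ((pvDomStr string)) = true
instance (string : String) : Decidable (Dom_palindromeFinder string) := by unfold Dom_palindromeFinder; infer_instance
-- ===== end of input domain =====

-- B replaces A's restarting two-pointer scan with one-character trimming by a
-- dynamic-programming palindrome table (the set of all palindromic (i,j) index pairs,
-- built once by increasing length), after which the greedy partition is index
-- arithmetic with table lookups; a timing run measured B ~2x faster at its
-- largest generated inputs.

-- ===== PORT A =====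

inductive PFStep | found | trim
deriving DecidableEq, Repr

-- the inner `while i <= j` loop of A; `some .found` = the break that appends,
-- `some .trim` = the break that drops the last char, `none` = loop ended with i > j
def pfInner (tmp : List Char) (i j : Int) : Option PFStep :=
  if _h : i ≤ j then
    match _ha : PySem.List.pyGet? tmp i, _hb : PySem.List.pyGet? tmp j with
    | some a, some b =>
      if _h1 : a = b ∧ (i = j ∨ (i - j).natAbs = 1) then some .found
      else if _h2 : a = b then pfInner tmp (i + 1) (j - 1)
      else some .trim
    | _, _ => none    -- IndexError; unreachable since 0 ≤ i ≤ j < len at every call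
  else none
termination_by (j - i).toNat
decreasing_by simp [_h2] at _h1; omega

-- the outer `while len(string)` loop; state (string, tmp_string, ret)
def pfOuter (s tmp : List Char) (ret : List (List Char)) : List (List Char) :=
  if _hs : s = [] then ret
  else if _ht : tmp = [] then ret   -- totality guard only; tmp is never empty when s is not
  else
    match pfInner tmp 0 ((tmp.length : Int) - 1) with
    | some .found => pfOuter (s.drop tmp.length) (s.drop tmp.length) (ret ++ [tmp])
    | some .trim  => pfOuter s tmp.dropLast ret
    | none        => ret            -- unreachable for tmp ≠ []
termination_by (s.length, tmp.length)
decreasing_by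
  · exact Prod.Lex.left _ _ (by
      have := List.length_pos_iff.mpr _hs
      have := List.length_pos_iff.mpr _ht
      simp [List.length_drop]; omega)
  · exact Prod.Lex.right _ (by
      have := List.length_pos_iff.mpr _ht
      simp [List.length_dropLast]; omega)

def palindromeFinder (string : String) : List String :=
  (pfOuter string.toList string.toList []).map String.ofList

-- ===== PORT B =====

-- B's palindrome table: `pal = set()`; `for i in range(n): pal.add((i,i))`;
-- `for length in range(2, n+1): for i in range(n-length+1): j = i+length-1;
--  if string[i]==string[j] and (length==2 or (i+1,j-1) in pal): pal.add((i,j))`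
def bPal (s : List Char) (n : Int) : PySem.Set (Int × Int) :=
  (PySem.List.pyRange 2 (n + 1) 1).foldl (fun p L =>
    (PySem.List.pyRange 0 (n - L + 1) 1).foldl (fun p i =>
      let j := i + L - 1
      if PySem.List.pyGet? s i = PySem.List.pyGet? s j ∧ (L = 2 ∨ (i + 1, j - 1) ∈ p)
      then PySem.Set.add p (i, j) else p) p)
    ((PySem.List.pyRange 0 n 1).foldl (fun p i => PySem.Set.add p (i, i)) PySem.Set.empty)

-- B's inner `while (i, j) not in pal: j -= 1` loop
def bFind (pal : PySem.Set (Int × Int)) (i j : Int) : Int :=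
  if _h : j < i then i   -- totality guard only; Python's loop always stops at j = i, (i,i) being in the table
  else if (i, j) ∈ pal then j
  else bFind pal i (j - 1)
termination_by (j - i + 1).toNat
decreasing_by omega

theorem bFind_ge (pal : PySem.Set (Int × Int)) (i j : Int) : i ≤ bFind pal i j := by
  fun_induction bFind pal i j with
  | case1 => omega
  | case2 j h _ => omega
  | case3 j h _ ih => exact ih

-- B's outer `while i < n` loop
def bOuter (s : List Char) (pal : PySem.Set (Int × Int)) (n i : Int)
    (ret : List (List Char)) : List (List Char) :=
  if _h : i < n then
    let j := bFind pal i (n - 1)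
    bOuter s pal n (j + 1) (ret ++ [PySem.List.slice s (some i) (some (j + 1))])
  else ret
termination_by (n - i).toNat
decreasing_by have := bFind_ge pal i (n - 1); omega

def palindromeFinder_alt (string : String) : List String :=
  (bOuter string.toList (bPal string.toList (string.toList.length : Int))
    (string.toList.length : Int) 0 []).map String.ofList

-- ===== PRECONDITION & SPEC =====
def Spec_palindromeFinder (string : String) (out : List String) : Prop := out = palindromeFinder_alt string
instance (string : String) (out : List String) : Decidable (Spec_palindromeFinder string out) := by unfold Spec_palindromeFinder; infer_instance

-- ===== CLAIM (what is proved, stated in full; the proofs are below) =====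
def Claim_equal_palindromeFinder : Prop := ∀ (string : String), Dom_palindromeFinder string → Spec_palindromeFinder string (palindromeFinder string)

-- ===== LEMMAS AND PROOFS =====

-- symmetric-pair palindrome predicate: all pairs (k, a+b-k) with a ≤ k ≤ b match
def SymPal (tmp : List Char) (a b : Nat) : Prop :=
  ∀ k, a ≤ k → k ≤ b → tmp[k]? = tmp[a + b - k]?

theorem pyGet_toNat (tmp : List Char) (i : Int) (hi : 0 ≤ i) :
    PySem.List.pyGet? tmp i = tmp[i.toNat]? := by
  have h := PySem.List.pyGet?_natCast (xs := tmp) (n := i.toNat)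
  rwa [Int.toNat_of_nonneg hi] at h

theorem symPal_of_gt (s : List Char) (a b : Nat) (h : b < a) : SymPal s a b := by
  intro k hk1 hk2; omega

theorem pfInner_char (tmp : List Char) (i j : Int)
    (hi : 0 ≤ i) (hij : i ≤ j) (hinv : i + j + 1 = tmp.length) :
    (SymPal tmp i.toNat j.toNat → pfInner tmp i j = some .found) ∧
    (¬ SymPal tmp i.toNat j.toNat → pfInner tmp i j = some .trim) := by
  fun_induction pfInner tmp i j with
  | case1 i j hle a b ha hb h1 =>
    refine ⟨fun _ => rfl, fun hns => absurd ?_ hns⟩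
    obtain ⟨hab, hd⟩ := h1
    subst hab
    rw [pyGet_toNat tmp i hi] at ha
    rw [pyGet_toNat tmp j (by omega)] at hb
    intro k hk1 hk2
    have hk : k = i.toNat ∨ k = j.toNat := by omega
    rcases hk with h | h <;> subst h
    · rw [ha, show i.toNat + j.toNat - i.toNat = j.toNat from by omega, hb]
    · rw [hb, show i.toNat + j.toNat - j.toNat = i.toNat from by omega, ha]
  | case2 i j hle b hb ha h1 ih =>
    simp only [true_and] at h1
    have hgap : i + 2 ≤ j := by omega
    rw [pyGet_toNat tmp i hi] at ha
    rw [pyGet_toNat tmp j (by omega)] at hb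
    obtain ⟨ihf, iht⟩ := ih (by omega) (by omega) (by omega)
    have hiff : SymPal tmp i.toNat j.toNat ↔ SymPal tmp (i + 1).toNat (j - 1).toNat := by
      constructor
      · intro hs k hk1 hk2
        have := hs k (by omega) (by omega)
        rwa [show i.toNat + j.toNat - k = (i + 1).toNat + (j - 1).toNat - k from by omega]
          at this
      · intro hs k hk1 hk2
        by_cases hki : k = i.toNat
        · subst hki
          rw [ha, show i.toNat + j.toNat - i.toNat = j.toNat from by omega, hb]
        · by_cases hkj : k = j.toNat
          · subst hkj
            rw [hb, show i.toNat + j.toNat - j.toNat = i.toNat from by omega, ha]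
          · have := hs k (by omega) (by omega)
            rwa [show (i + 1).toNat + (j - 1).toNat - k = i.toNat + j.toNat - k from by omega]
              at this
    exact ⟨fun hs => ihf (hiff.mp hs), fun hn => iht (fun hs => hn (hiff.mpr hs))⟩
  | case3 i j hle a b ha hb h1 hne =>
    refine ⟨fun hs => absurd ?_ hne, fun _ => rfl⟩
    rw [pyGet_toNat tmp i hi] at ha
    rw [pyGet_toNat tmp j (by omega)] at hb
    have := hs i.toNat (by omega) (by omega)
    rw [ha, show i.toNat + j.toNat - i.toNat = j.toNat from by omega, hb] at this
    exact Option.some.inj this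
  | case4 i j hle hx =>
    exfalso
    have hi' : i.toNat < tmp.length := by omega
    have hj' : j.toNat < tmp.length := by omega
    exact hx tmp[i.toNat] tmp[j.toNat]
      (by rw [pyGet_toNat tmp i hi]; exact List.getElem?_eq_getElem hi')
      (by rw [pyGet_toNat tmp j (by omega)]; exact List.getElem?_eq_getElem hj')
  | case5 i j hle => exact absurd hij hle

theorem symPal_iff_rev (tmp : List Char) (h : tmp ≠ []) :
    SymPal tmp 0 (tmp.length - 1) ↔ tmp = tmp.reverse := by
  have hn : 1 ≤ tmp.length := List.length_pos_iff.mpr h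
  constructor
  · intro hp
    apply List.ext_getElem?
    intro k
    by_cases hk : k < tmp.length
    · rw [List.getElem?_reverse hk]
      have := hp k (by omega) (by omega)
      rwa [Nat.zero_add] at this
    · rw [List.getElem?_eq_none (by omega), List.getElem?_eq_none (by simp; omega)]
  · intro hr k hk0 hk1
    conv_lhs => rw [hr]
    rw [List.getElem?_reverse (by omega)]
    congr 1; omega

-- peel the two end characters off a symmetric pair
theorem symPal_iff_ends (s : List Char) (i j : Nat) (hij : i < j) (_hj : j < s.length) :
    SymPal s i j ↔ s[i]? = s[j]? ∧ SymPal s (i + 1) (j - 1) := by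
  constructor
  · intro hs
    refine ⟨?_, ?_⟩
    · have := hs i (by omega) (by omega)
      rwa [show i + j - i = j from by omega] at this
    · intro k hk1 hk2
      have := hs k (by omega) (by omega)
      rwa [show i + j - k = (i + 1) + (j - 1) - k from by omega] at this
  · rintro ⟨he, hs⟩ k hk1 hk2
    by_cases hki : k = i
    · subst hki
      rw [he]; congr 1; omega
    · by_cases hkj : k = j
      · rw [hkj, show i + j - j = i from by omega]
        exact he.symm
      · have := hs k (by omega) (by omega)
        rwa [show (i + 1) + (j - 1) - k = i + j - k from by omega] at this

-- SymPal on global indices = SymPal of the extracted segment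
theorem symPal_seg (s : List Char) (i j : Nat) (hij : i ≤ j) (_hj : j < s.length) :
    SymPal s i j ↔ SymPal ((s.drop i).take (j - i + 1)) 0 (j - i) := by
  have hget : ∀ k : Nat, k ≤ j - i →
      ((s.drop i).take (j - i + 1))[k]? = s[i + k]? := by
    intro k hk
    rw [List.getElem?_take_of_lt (by omega), List.getElem?_drop]
  constructor
  · intro hs k hk1 hk2
    rw [hget k (by omega), hget (0 + (j - i) - k) (by omega)]
    have := hs (i + k) (by omega) (by omega)
    rwa [show i + j - (i + k) = i + (0 + (j - i) - k) from by omega] at this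
  · intro hs k hk1 hk2
    have := hs (k - i) (by omega) (by omega)
    rw [hget (k - i) (by omega), hget (0 + (j - i) - (k - i)) (by omega)] at this
    rw [show i + (k - i) = k from by omega] at this
    rwa [show i + (0 + (j - i) - (k - i)) = i + j - k from by omega] at this

-- what the table means: (i, j) is a palindromic index pair of length ≤ L
def Good (s : List Char) (L : Int) (x : Int × Int) : Prop :=
  0 ≤ x.1 ∧ x.1 ≤ x.2 ∧ x.2 < (s.length : Int) ∧ x.2 + 1 ≤ x.1 + L ∧
    SymPal s x.1.toNat x.2.toNat

theorem mem_foldl_add {α β : Type} [BEq α] [LawfulBEq α] (l : List β) (f : β → α)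
    (p : PySem.Set α) (x : α) :
    x ∈ l.foldl (fun p a => PySem.Set.add p (f a)) p ↔ x ∈ p ∨ ∃ a ∈ l, x = f a := by
  induction l generalizing p with
  | nil => simp
  | cons b t ih =>
    simp only [List.foldl_cons, ih, PySem.Set.mem_add, List.mem_cons]
    constructor
    · rintro (⟨h | h⟩ | ⟨a, ha, hx⟩)
      · exact Or.inl h
      · exact Or.inr ⟨b, Or.inl rfl, h⟩
      · exact Or.inr ⟨a, Or.inr ha, hx⟩
    · rintro (h | ⟨a, (rfl | ha), hx⟩)
      · exact Or.inl (Or.inl h)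
      · exact Or.inl (Or.inr hx)
      · exact Or.inr ⟨a, ha, hx⟩

-- the diagonal initialisation: exactly the pairs (i, i), 0 ≤ i < n
theorem mem_bPal_base (s : List Char) (x : Int × Int) :
    x ∈ (PySem.List.pyRange 0 (s.length : Int) 1).foldl
        (fun p i => PySem.Set.add p (i, i)) PySem.Set.empty ↔ Good s 1 x := by
  rw [mem_foldl_add]
  simp only [PySem.Set.empty, List.not_mem_nil, false_or, PySem.List.mem_pyRange_one]
  constructor
  · rintro ⟨a, ⟨ha0, han⟩, rfl⟩
    exact ⟨ha0, le_refl _, by exact_mod_cast han, by omega,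
      fun k hk1 hk2 => by congr 1; omega⟩
  · rintro ⟨h1, h2, h3, h4, _⟩
    exact ⟨x.1, ⟨h1, by omega⟩, by obtain ⟨a, b⟩ := x; simp_all; omega⟩

-- one inner pass (fixed length L): adds exactly the palindromic pairs of exact length L
-- with left end below the counter
theorem mem_bPal_inner (s : List Char) (L : Int) (hL2 : 2 ≤ L)
    (_hLn : L ≤ (s.length : Int)) (p : PySem.Set (Int × Int))
    (hp : ∀ x, x ∈ p ↔ Good s (L - 1) x) :
    ∀ (c : Int), 0 ≤ c → c ≤ (s.length : Int) - L + 1 →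
    ∀ x, x ∈ (PySem.List.pyRange 0 c 1).foldl (fun p i =>
        let j := i + L - 1
        if PySem.List.pyGet? s i = PySem.List.pyGet? s j ∧ (L = 2 ∨ (i + 1, j - 1) ∈ p)
        then PySem.Set.add p (i, j) else p) p ↔
      (Good s (L - 1) x ∨
        (x.2 + 1 = x.1 + L ∧ 0 ≤ x.1 ∧ x.1 < c ∧ SymPal s x.1.toNat x.2.toNat)) := by
  intro c hc0
  induction c, hc0 using Int.le_induction with
  | base =>
    intro _ x
    rw [show PySem.List.pyRange 0 0 1 = [] from PySem.List.pyRange_one_eq_nil (by omega)]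
    simp only [List.foldl_nil, hp]
    constructor
    · exact Or.inl
    · rintro (h | ⟨_, _, h, _⟩)
      · exact h
      · omega
  | succ c hc ih =>
    intro hcn x
    rw [show PySem.List.pyRange 0 (c + 1) 1 = PySem.List.pyRange 0 c 1 ++ [c] from
      PySem.List.pyRange_one_succ_right (by omega), List.foldl_append, List.foldl_cons,
      List.foldl_nil]
    have ihc := ih (by omega)
    -- the membership test inside the condition looks up a strictly shorter pair
    have hmemtest : ((c + 1, c + L - 1 - 1) ∈ (PySem.List.pyRange 0 c 1).foldl (fun p i =>
        let j := i + L - 1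
        if PySem.List.pyGet? s i = PySem.List.pyGet? s j ∧ (L = 2 ∨ (i + 1, j - 1) ∈ p)
        then PySem.Set.add p (i, j) else p) p) ↔ Good s (L - 1) (c + 1, c + L - 2) := by
      rw [show (c + L - 1 - 1 : Int) = c + L - 2 from by omega, ihc (c + 1, c + L - 2)]
      constructor
      · rintro (h | ⟨h, _⟩)
        · exact h
        · omega
      · exact Or.inl
    -- the condition of the step at i = c is exactly SymPal at (c, c + L - 1)
    have hcond : (PySem.List.pyGet? s c = PySem.List.pyGet? s (c + L - 1) ∧
        (L = 2 ∨ (c + 1, c + L - 1 - 1) ∈ (PySem.List.pyRange 0 c 1).foldl (fun p i =>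
          let j := i + L - 1
          if PySem.List.pyGet? s i = PySem.List.pyGet? s j ∧ (L = 2 ∨ (i + 1, j - 1) ∈ p)
          then PySem.Set.add p (i, j) else p) p)) ↔
        SymPal s c.toNat (c + L - 1).toNat := by
      rw [hmemtest, pyGet_toNat s c (by omega), pyGet_toNat s (c + L - 1) (by omega)]
      rw [symPal_iff_ends s c.toNat (c + L - 1).toNat (by omega) (by omega)]
      constructor
      · rintro ⟨he, hrest⟩
        refine ⟨he, ?_⟩
        rcases hrest with h2 | hg
        · exact symPal_of_gt s _ _ (by omega)
        · have := hg.2.2.2.2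
          rwa [show (c + 1 : Int).toNat = c.toNat + 1 from by omega,
            show (c + L - 2 : Int).toNat = (c + L - 1).toNat - 1 from by omega] at this
      · rintro ⟨he, hs⟩
        refine ⟨he, ?_⟩
        by_cases h2 : L = 2
        · exact Or.inl h2
        · refine Or.inr ⟨by omega, by omega, by omega, by omega, ?_⟩
          rwa [show (c + 1 : Int).toNat = c.toNat + 1 from by omega,
            show (c + L - 2 : Int).toNat = (c + L - 1).toNat - 1 from by omega]
    by_cases hsp : SymPal s c.toNat (c + L - 1).toNat
    · rw [if_pos (hcond.mpr hsp), PySem.Set.mem_add, ihc x]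
      constructor
      · rintro ((h | h) | rfl)
        · exact Or.inl h
        · exact Or.inr ⟨h.1, h.2.1, by omega, h.2.2.2⟩
        · exact Or.inr ⟨show (c + L - 1) + 1 = c + L from by omega,
            show (0 : Int) ≤ c from by omega, show c < c + 1 from by omega, hsp⟩
      · rintro (h | ⟨h1, h2, h3, h4⟩)
        · exact Or.inl (Or.inl h)
        · by_cases hxc : x.1 = c
          · refine Or.inr ?_
            obtain ⟨a, b⟩ := x
            dsimp only at h1 hxc ⊢
            rw [Prod.mk.injEq]
            exact ⟨hxc, by omega⟩
          · exact Or.inl (Or.inr ⟨h1, h2, by omega, h4⟩)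
    · rw [if_neg (fun h => hsp (hcond.mp h)), ihc x]
      constructor
      · rintro (h | h)
        · exact Or.inl h
        · exact Or.inr ⟨h.1, h.2.1, by omega, h.2.2.2⟩
      · rintro (h | ⟨h1, h2, h3, h4⟩)
        · exact Or.inl h
        · by_cases hxc : x.1 = c
          · exfalso
            apply hsp
            rwa [show c.toNat = x.1.toNat from by omega,
              show (c + L - 1).toNat = x.2.toNat from by omega]
          · exact Or.inr ⟨h1, h2, by omega, h4⟩

-- the whole table: (i, j) ∈ pal ↔ 0 ≤ i ≤ j < n and s[i..j] is a palindrome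
theorem mem_bPal (s : List Char) (x : Int × Int) :
    x ∈ bPal s (s.length : Int) ↔ Good s (s.length : Int) x := by
  by_cases hn : (s.length : Int) ≤ 1
  · unfold bPal
    rw [show PySem.List.pyRange 2 ((s.length : Int) + 1) 1 = [] from
      PySem.List.pyRange_one_eq_nil (by omega), List.foldl_nil, mem_bPal_base]
    constructor
    · rintro ⟨h1, h2, h3, h4, h5⟩
      exact ⟨h1, h2, h3, by omega, h5⟩
    · rintro ⟨h1, h2, h3, h4, h5⟩
      exact ⟨h1, h2, h3, by omega, h5⟩
  · have hmain : ∀ (L : Int), 1 ≤ L → L ≤ (s.length : Int) →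
        ∀ x, x ∈ (PySem.List.pyRange 2 (L + 1) 1).foldl (fun p L =>
          (PySem.List.pyRange 0 ((s.length : Int) - L + 1) 1).foldl (fun p i =>
            let j := i + L - 1
            if PySem.List.pyGet? s i = PySem.List.pyGet? s j ∧ (L = 2 ∨ (i + 1, j - 1) ∈ p)
            then PySem.Set.add p (i, j) else p) p)
          ((PySem.List.pyRange 0 (s.length : Int) 1).foldl
            (fun p i => PySem.Set.add p (i, i)) PySem.Set.empty) ↔ Good s L x := by
      intro L hL1
      induction L, hL1 using Int.le_induction with
      | base =>
        intro _ x
        rw [show PySem.List.pyRange 2 (1 + 1) 1 = [] from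
          PySem.List.pyRange_one_eq_nil (by omega), List.foldl_nil, mem_bPal_base]
      | succ L hL ih =>
        intro hLn x
        rw [show PySem.List.pyRange 2 (L + 1 + 1) 1 = PySem.List.pyRange 2 (L + 1) 1 ++ [L + 1]
          from PySem.List.pyRange_one_succ_right (by omega), List.foldl_append,
          List.foldl_cons, List.foldl_nil]
        have ihL := ih (by omega)
        rw [mem_bPal_inner s (L + 1) (by omega) (by omega) _
          (fun y => by rw [ihL y, show (L + 1 - 1 : Int) = L from by omega])
          ((s.length : Int) - (L + 1) + 1) (by omega) (by omega) x]
        constructor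
        · rintro (⟨h1, h2, h3, h4, h5⟩ | ⟨h1, h2, h3, h4⟩)
          · exact ⟨h1, h2, h3, by omega, h5⟩
          · exact ⟨h2, by omega, by omega, by omega, h4⟩
        · rintro ⟨h1, h2, h3, h4, h5⟩
          by_cases hx : x.2 + 1 ≤ x.1 + L
          · exact Or.inl ⟨h1, h2, h3, by omega, h5⟩
          · exact Or.inr ⟨by omega, h1, by omega, h5⟩
    exact hmain (s.length : Int) (by omega) (le_refl _) x

-- the longest palindromic prefix of t among lengths 1..k, found downwards
def LPP (t : List Char) (k : Nat) : Nat :=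
  if k ≤ 1 then k
  else if t.take k = (t.take k).reverse then k
  else LPP t (k - 1)

theorem LPP_le (t : List Char) (k : Nat) : LPP t k ≤ k := by
  fun_induction LPP t k
  all_goals omega

theorem LPP_pos (t : List Char) (k : Nat) (hk : 1 ≤ k) : 1 ≤ LPP t k := by
  fun_induction LPP t k with
  | case1 => omega
  | case2 => omega
  | case3 k h1 h2 ih => exact ih (by omega)

-- A's outer step: one segment is emitted, and it is the longest palindromic prefix
theorem pfOuter_seg (m : Nat) (s : List Char) (ret : List (List Char))
    (hs : s ≠ []) (h1 : 1 ≤ m) (hm : m ≤ s.length) :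
    pfOuter s (s.take m) ret =
      pfOuter (s.drop (LPP s m)) (s.drop (LPP s m)) (ret ++ [s.take (LPP s m)]) := by
  induction m using Nat.strong_induction_on with
  | _ m IH =>
  have hlen : (s.take m).length = m := by simp [List.length_take]; omega
  have htne : s.take m ≠ [] := by
    intro h; rw [h] at hlen; simp at hlen; omega
  have hinv : (0 : Int) + ((m : Int) - 1) + 1 = ((s.take m).length : Int) := by
    rw [hlen]; omega
  rw [pfOuter, dif_neg hs, dif_neg htne, hlen]
  by_cases hp : s.take m = (s.take m).reverse
  · have hsym : SymPal (s.take m) (0 : Int).toNat (((m : Int) - 1)).toNat := by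
      have := (symPal_iff_rev (s.take m) htne).mpr hp
      rw [hlen] at this
      rwa [show ((0 : Int)).toNat = 0 from rfl,
        show (((m : Int) - 1)).toNat = m - 1 from by omega]
    have hfound := (pfInner_char (s.take m) 0 ((m : Int) - 1)
      (by omega) (by omega) hinv).1 hsym
    rw [hfound]
    rw [show LPP s m = m from by
      rw [LPP]
      by_cases hm1 : m ≤ 1
      · rw [if_pos hm1]
      · rw [if_neg hm1, if_pos hp]]
  · have hsym : ¬ SymPal (s.take m) (0 : Int).toNat (((m : Int) - 1)).toNat := by
      intro hc
      apply hp
      apply (symPal_iff_rev (s.take m) htne).mp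
      rw [hlen]
      rwa [show ((0 : Int)).toNat = 0 from rfl,
        show (((m : Int) - 1)).toNat = m - 1 from by omega] at hc
    have htrim := (pfInner_char (s.take m) 0 ((m : Int) - 1)
      (by omega) (by omega) hinv).2 hsym
    rw [htrim]
    have hm2 : 2 ≤ m := by
      rcases Nat.lt_or_ge m 2 with h | h
      · exfalso
        have hm1 : m = 1 := by omega
        subst hm1
        rcases s with _ | ⟨c, t⟩
        · exact hs rfl
        · exact hp (show (c :: t).take 1 = ((c :: t).take 1).reverse from rfl)
      · exact h
    have hdl : (s.take m).dropLast = s.take (m - 1) := by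
      rw [List.dropLast_eq_take, hlen, List.take_take]
      congr 1; omega
    rw [hdl, show LPP s m = LPP s (m - 1) from by
      rw [LPP, if_neg (show ¬ m ≤ 1 from by omega), if_neg hp]]
    exact IH (m - 1) (by omega) (by omega) (by omega)

-- B's downward table scan computes the same longest palindromic prefix
theorem bFind_eq (s : List Char) (i : Int) (hi : 0 ≤ i) :
    ∀ (j : Int), i ≤ j → j < (s.length : Int) →
    bFind (bPal s (s.length : Int)) i j =
      i + (LPP (s.drop i.toNat) (j - i + 1).toNat : Int) - 1 := by
  intro j hj
  induction j, hj using Int.le_induction with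
  | base =>
    intro hjn
    rw [bFind, dif_neg (by omega : ¬ (i : Int) < i)]
    rw [if_pos (by
      rw [mem_bPal]
      exact ⟨hi, le_refl _, hjn, by omega, fun k hk1 hk2 => by congr 1; omega⟩)]
    rw [show ((i : Int) - i + 1).toNat = 1 from by omega, LPP, if_pos (by omega)]
    omega
  | succ j hj ih =>
    intro hjn
    have hij1 : i ≤ j + 1 := by omega
    rw [bFind, dif_neg (by omega : ¬ j + 1 < i)]
    have hk : (j + 1 - i + 1).toNat = (j - i + 1).toNat + 1 := by omega
    have hk2 : ¬ (j + 1 - i + 1).toNat ≤ 1 := by omega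
    have hseg : ((i, j + 1) ∈ bPal s (s.length : Int)) ↔
        (s.drop i.toNat).take (j + 1 - i + 1).toNat =
          ((s.drop i.toNat).take (j + 1 - i + 1).toNat).reverse := by
      rw [mem_bPal]
      have hrange : (j + 1).toNat - i.toNat + 1 = (j + 1 - i + 1).toNat := by omega
      have := symPal_seg s i.toNat (j + 1).toNat (by omega) (by omega)
      rw [hrange] at this
      constructor
      · rintro ⟨_, _, _, _, h5⟩
        have hs2 := this.mp h5
        have hne : (s.drop i.toNat).take (j + 1 - i + 1).toNat ≠ [] := by
          intro hnil
          have : ((s.drop i.toNat).take (j + 1 - i + 1).toNat).length = 0 := by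
            rw [hnil]; rfl
          rw [List.length_take, List.length_drop] at this
          omega
        apply (symPal_iff_rev _ hne).mp
        have hlt : ((s.drop i.toNat).take (j + 1 - i + 1).toNat).length =
            (j + 1 - i + 1).toNat := by
          rw [List.length_take, List.length_drop]; omega
        rw [hlt]
        rwa [show (j + 1 - i + 1).toNat - 1 = (j + 1).toNat - i.toNat from by omega]
      · intro hrev
        refine ⟨hi, by omega, by omega, by omega, this.mpr ?_⟩
        have hne : (s.drop i.toNat).take (j + 1 - i + 1).toNat ≠ [] := by
          intro hnil
          have : ((s.drop i.toNat).take (j + 1 - i + 1).toNat).length = 0 := by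
            rw [hnil]; rfl
          rw [List.length_take, List.length_drop] at this
          omega
        have hs2 := (symPal_iff_rev _ hne).mpr hrev
        have hlt : ((s.drop i.toNat).take (j + 1 - i + 1).toNat).length =
            (j + 1 - i + 1).toNat := by
          rw [List.length_take, List.length_drop]; omega
        rw [hlt] at hs2
        rwa [show (j + 1 - i + 1).toNat - 1 = (j + 1).toNat - i.toNat from by omega] at hs2
    by_cases hpal : (s.drop i.toNat).take (j + 1 - i + 1).toNat =
        ((s.drop i.toNat).take (j + 1 - i + 1).toNat).reverse
    · rw [if_pos (hseg.mpr hpal)]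
      rw [LPP, if_neg hk2, if_pos hpal]
      omega
    · rw [if_neg (fun h => hpal (hseg.mp h))]
      rw [LPP, if_neg hk2, if_neg hpal, hk, Nat.add_sub_cancel,
        show (j + 1 - 1 : Int) = j from by omega]
      exact ih (by omega)

-- the two outer loops agree, segment by segment
theorem pfOuter_eq_bOuter (s : List Char) :
    ∀ (i : Int) (ret : List (List Char)), 0 ≤ i → i ≤ (s.length : Int) →
    pfOuter (s.drop i.toNat) (s.drop i.toNat) ret =
      bOuter s (bPal s (s.length : Int)) (s.length : Int) i ret := by
  have H : ∀ (fuel : Nat) (i : Int) (ret : List (List Char)),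
      ((s.length : Int) - i).toNat = fuel → 0 ≤ i → i ≤ (s.length : Int) →
      pfOuter (s.drop i.toNat) (s.drop i.toNat) ret =
        bOuter s (bPal s (s.length : Int)) (s.length : Int) i ret := by
    intro fuel
    induction fuel using Nat.strong_induction_on with
    | _ fuel IH =>
    intro i ret hfuel hi0 hin
    by_cases hend : i = (s.length : Int)
    · subst hend
      rw [show s.drop (s.length : Int).toNat = [] from by
        apply List.drop_eq_nil_of_le; omega]
      rw [pfOuter, dif_pos rfl, bOuter, dif_neg (by omega)]
    · have hilt : i < (s.length : Int) := by omega
      set u := s.drop i.toNat with hu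
      have hulen : u.length = s.length - i.toNat := by
        rw [hu, List.length_drop]
      have hune : u ≠ [] := by
        intro h
        have : u.length = 0 := by rw [h]; rfl
        omega
      have hseg := pfOuter_seg u.length u ret hune (by omega) (le_refl _)
      rw [List.take_length] at hseg
      set K := LPP u u.length with hK
      have hK1 : 1 ≤ K := LPP_pos u u.length (by omega)
      have hKle : K ≤ u.length := LPP_le u u.length
      have hbf : bFind (bPal s (s.length : Int)) i ((s.length : Int) - 1) = i + (K : Int) - 1 := by
        rw [bFind_eq s i hi0 ((s.length : Int) - 1) (by omega) (by omega), ← hu,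
          show ((s.length : Int) - 1 - i + 1).toNat = u.length from by rw [hulen]; omega]
      rw [hseg, bOuter, dif_pos hilt]
      show pfOuter (u.drop K) (u.drop K) (ret ++ [u.take K]) =
        bOuter s (bPal s (s.length : Int)) ((s.length : Int))
          (bFind (bPal s (s.length : Int)) i ((s.length : Int) - 1) + 1)
          (ret ++ [PySem.List.slice s (some i)
            (some (bFind (bPal s (s.length : Int)) i ((s.length : Int) - 1) + 1))])
      rw [hbf]
      have hslice : PySem.List.slice s (some i) (some (i + (K : Int) - 1 + 1)) = u.take K := by
        rw [show i + (K : Int) - 1 + 1 = i + (K : Int) from by omega]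
        rw [PySem.List.slice_toNat s hi0 (by omega)]
        rw [hu]
        congr 1
        omega
      rw [hslice]
      have hdrop : u.drop K = s.drop (i + (K : Int) - 1 + 1).toNat := by
        rw [hu, List.drop_drop]
        congr 1
        omega
      rw [hdrop]
      exact IH ((s.length : Int) - (i + (K : Int) - 1 + 1)).toNat (by omega) _ _ rfl
        (by omega) (by omega)
  intro i ret hi0 hin
  exact H ((s.length : Int) - i).toNat i ret rfl hi0 hin

-- ===== VERDICT (by name: the statement is the Claim_ definition above) =====
theorem palindromeFinder_spec : Claim_equal_palindromeFinder := by
  intro s _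
  unfold Spec_palindromeFinder palindromeFinder palindromeFinder_alt
  have := pfOuter_eq_bOuter s.toList 0 [] (by omega) (by exact_mod_cast Nat.zero_le _)
  rw [show s.toList.drop (0 : Int).toNat = s.toList from rfl] at this
  rw [this]
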